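-- pv_equiv track=rewrite | github.com/SheriffOfRobinhood/Subfilter | source/subfilter.py | find_var
-- ===== SOURCE A (Python) =====
-- def find_var(vdims, var):
--     index_list = []
--     for v in var :
--         for i, vdim in enumerate(vdims):
--             if v in vdim:
--                 index_list.append(i)
--                 break
--     return tuple(index_list)
-- ===== SOURCE B (Python) =====
-- def find_var(vdims, var):
--     # dim-major: assign each var position the index of the first dim containing it
--     res = [None] * len(var)
--     for i, vdim in enumerate(vdims):
--         for j, v in enumerate(var):
--             if res[j] is None and v in vdim:
--                 res[j] = i
--     return tuple(x for x in res if x is not None)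
-- ===== Notes on version B (the rewrite author's own statement) =====
-- stated objective: alternative
-- what changed: Reversed the loop nesting to dim-major: a sentinel slot per var element is filled by the first (lowest-index) dim containing it, then sentinels are filtered out, instead of a var-major scan with an inner break.
import Mathlib
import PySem

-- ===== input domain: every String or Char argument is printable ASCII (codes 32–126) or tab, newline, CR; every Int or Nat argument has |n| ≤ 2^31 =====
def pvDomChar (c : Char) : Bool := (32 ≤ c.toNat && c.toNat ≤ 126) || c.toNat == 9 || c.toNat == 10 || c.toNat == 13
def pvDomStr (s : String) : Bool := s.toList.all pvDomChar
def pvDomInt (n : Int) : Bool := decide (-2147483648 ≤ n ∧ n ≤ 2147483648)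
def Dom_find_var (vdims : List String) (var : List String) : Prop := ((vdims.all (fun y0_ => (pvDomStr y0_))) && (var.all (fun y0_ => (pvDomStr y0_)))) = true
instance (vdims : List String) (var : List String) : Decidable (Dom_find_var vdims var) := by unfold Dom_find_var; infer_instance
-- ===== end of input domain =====

-- B reverses the loop nesting to dim-major with a sentinel slot per var element (alternative decomposition, same cost).


-- ===== PORT A =====
-- inner loop of A: first index i with 'v in vdim', breaking at the first hit
def pvFirstDim (v : String) : List (Int × String) → Option Int
  | [] => none
  | (i, vdim) :: rest => if PySem.Str.isIn v vdim then some i else pvFirstDim v rest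

def find_var (vdims : List String) (var : List String) : List Int :=
  var.foldl (fun index_list v =>
    match pvFirstDim v (PySem.List.enumerate vdims) with
    | some i => index_list ++ [i]
    | none => index_list) []

-- ===== PORT B =====
-- one dim-major pass: fill still-empty slots whose var element is contained in vdim
def pvStepDim (var : List String) (i : Int) (vdim : String) (res : List (Option Int)) : List (Option Int) :=
  List.zipWith (fun r v => if r.isNone && PySem.Str.isIn v vdim then some i else r) res var

def find_var_alt (vdims : List String) (var : List String) : List Int :=
  (((PySem.List.enumerate vdims).foldl (fun res p => pvStepDim var p.1 p.2 res)
      (var.map (fun _ => none))).filterMap id)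

-- ===== PRECONDITION & SPEC =====
def Spec_find_var (vdims : List String) (var : List String) (out : List Int) : Prop := out = find_var_alt vdims var
instance (vdims : List String) (var : List String) (out : List Int) : Decidable (Spec_find_var vdims var out) := by unfold Spec_find_var; infer_instance

-- ===== CLAIM (what is proved, stated in full; the proofs are below) =====
def Claim_equal_find_var : Prop := ∀ (vdims : List String) (var : List String), Dom_find_var vdims var → Spec_find_var vdims var (find_var vdims var)

-- ===== LEMMAS AND PROOFS =====

theorem pvStepDim_map (var : List String) (i : Int) (vdim : String) (g : String → Option Int) :
    pvStepDim var i vdim (var.map g)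
      = var.map (fun v => if (g v).isNone && PySem.Str.isIn v vdim then some i else g v) := by
  induction var with
  | nil => rfl
  | cons v vs ih => simp [pvStepDim] at ih ⊢; exact ih

theorem pvFoldB (es : List (Int × String)) (var : List String) (g : String → Option Int) :
    es.foldl (fun res p => pvStepDim var p.1 p.2 res) (var.map g)
      = var.map (fun v => match g v with | some x => some x | none => pvFirstDim v es) := by
  induction es generalizing g with
  | nil =>
    simp only [List.foldl_nil]
    exact List.map_congr_left (fun v _ => by cases g v <;> simp [pvFirstDim])
  | cons p es ih =>
    obtain ⟨i, d⟩ := p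
    rw [List.foldl_cons, pvStepDim_map, ih]
    refine List.map_congr_left (fun v _ => ?_)
    cases hg : g v with
    | some x => simp
    | none =>
      by_cases h : PySem.Chars.isIn v.toList d.toList = true <;>
        simp [pvFirstDim, PySem.Str.isIn, h]

theorem pvFoldA (var : List String) (F : String → Option Int) (acc : List Int) :
    var.foldl (fun index_list v =>
        match F v with | some i => index_list ++ [i] | none => index_list) acc
      = acc ++ (var.map F).filterMap id := by
  induction var generalizing acc with
  | nil => simp
  | cons v vs ih =>
    cases h : F v <;> simp [ih, h]

-- ===== VERDICT (by name: the statement is the Claim_ definition above) =====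
theorem find_var_spec : Claim_equal_find_var := by
  intro vdims var _
  show find_var vdims var = find_var_alt vdims var
  rw [find_var, find_var_alt, pvFoldB, pvFoldA]
  simp
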